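-- pv_equiv track=rewrite | github.com/sco-edge/E2FL | eval_E2FL_20240628/convert_nethogs_log.py | align_network_usage_with_wait_time
-- ===== SOURCE A (Python) =====
-- def align_network_usage_with_wait_time(network_data, wait_times):
--     aligned_data = []
--     for wait_time in wait_times:
--         if network_data:
--             aligned_data.append(network_data.pop(0))
--         else:
--             aligned_data.append({'sent': 0, 'recv': 0})
--     return aligned_data
-- ===== SOURCE B (Python) =====
-- def align_network_usage_with_wait_time(network_data, wait_times):
--     n = len(wait_times)
--     result = network_data[:n] + [{'sent': 0, 'recv': 0}
--                                  for _ in range(max(0, n - len(network_data)))]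
--     del network_data[:n]  # replicate A's in-place consumption of network_data
--     return result
-- ===== Notes on version B (the rewrite author's own statement) =====
-- stated objective: simpler
-- what changed: Replaces the per-element loop that pops from network_data with bulk slice + padding-comprehension concatenation (plus one del to keep A's in-place shortening of network_data).
import Mathlib
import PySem

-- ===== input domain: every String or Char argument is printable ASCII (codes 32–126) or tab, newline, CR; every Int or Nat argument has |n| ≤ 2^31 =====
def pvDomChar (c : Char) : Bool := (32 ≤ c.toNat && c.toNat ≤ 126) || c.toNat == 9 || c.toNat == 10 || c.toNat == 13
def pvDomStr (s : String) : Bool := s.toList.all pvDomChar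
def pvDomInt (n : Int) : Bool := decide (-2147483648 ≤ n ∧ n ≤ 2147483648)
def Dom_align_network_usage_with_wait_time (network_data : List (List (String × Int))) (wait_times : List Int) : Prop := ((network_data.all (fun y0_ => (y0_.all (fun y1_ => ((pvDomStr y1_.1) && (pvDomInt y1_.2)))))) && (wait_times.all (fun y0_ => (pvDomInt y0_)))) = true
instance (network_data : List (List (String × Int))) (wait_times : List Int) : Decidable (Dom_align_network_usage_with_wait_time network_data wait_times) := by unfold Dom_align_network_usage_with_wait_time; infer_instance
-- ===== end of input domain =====

-- B replaces A's pop(0)-per-wait_time loop by slice + padding concatenation (plus one `del` to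
-- replicate A's in-place shortening of network_data; the equivalence proved here is about the
-- RETURN value only).


-- ===== PORT A =====
-- the loop: for wait_time in wait_times, pop from the front of network_data if nonempty,
-- otherwise append the zero dict; state = (remaining network_data, aligned_data accumulator)
def alignLoopA (wait_times : List Int) (network_data : List (List (String × Int)))
    (aligned_data : List (List (String × Int))) : List (List (String × Int)) :=
  match wait_times with
  | [] => aligned_data
  | _ :: ws =>
    match network_data with
    | [] => alignLoopA ws [] (aligned_data ++ [[("sent", 0), ("recv", 0)]])
    | x :: rest => alignLoopA ws rest (aligned_data ++ [x])

def align_network_usage_with_wait_time (network_data : List (List (String × Int))) (wait_times : List Int) : List (List (String × Int)) :=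
  alignLoopA wait_times network_data []

-- ===== PORT B =====
-- n = len(wait_times); network_data[:n] + [{'sent':0,'recv':0}] * max(0, n - len(network_data))
def align_network_usage_with_wait_time_alt (network_data : List (List (String × Int))) (wait_times : List Int) : List (List (String × Int)) :=
  let n := wait_times.length
  network_data.take n ++ List.replicate (n - network_data.length) [("sent", 0), ("recv", 0)]

-- ===== PRECONDITION & SPEC =====
def Spec_align_network_usage_with_wait_time (network_data : List (List (String × Int))) (wait_times : List Int) (out : List (List (String × Int))) : Prop := out = align_network_usage_with_wait_time_alt network_data wait_times
instance (network_data : List (List (String × Int))) (wait_times : List Int) (out : List (List (String × Int))) : Decidable (Spec_align_network_usage_with_wait_time network_data wait_times out) := by unfold Spec_align_network_usage_with_wait_time; infer_instance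

-- ===== CLAIM (what is proved, stated in full; the proofs are below) =====
def Claim_equal_align_network_usage_with_wait_time : Prop := ∀ (network_data : List (List (String × Int))) (wait_times : List Int), Dom_align_network_usage_with_wait_time network_data wait_times → Spec_align_network_usage_with_wait_time network_data wait_times (align_network_usage_with_wait_time network_data wait_times)

-- ===== LEMMAS AND PROOFS =====
theorem alignLoopA_eq (wait_times : List Int) :
    ∀ (nd acc : List (List (String × Int))),
      alignLoopA wait_times nd acc =
        acc ++ (nd.take wait_times.length ++
          List.replicate (wait_times.length - nd.length) [("sent", 0), ("recv", 0)]) := by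
  induction wait_times with
  | nil => intro nd acc; simp [alignLoopA]
  | cons w ws ih =>
    intro nd acc
    cases nd with
    | nil => simp [alignLoopA, ih, List.replicate_succ]
    | cons x rest => simp [alignLoopA, ih]

-- ===== VERDICT (by name: the statement is the Claim_ definition above) =====
theorem align_network_usage_with_wait_time_spec : Claim_equal_align_network_usage_with_wait_time := by
  intro nd wt _
  unfold Spec_align_network_usage_with_wait_time align_network_usage_with_wait_time
    align_network_usage_with_wait_time_alt
  simp [alignLoopA_eq]
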